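-- pv_equiv track=rewrite | github.com/Capital-Letters/2048 | 2048_other.py | same_element_merge
-- ===== SOURCE A (Python) =====
-- def same_element_merge(list) :
--     indexA = 0
--     indexB = 0
--     for x in range(len(list)):
--         while indexA < len(list[x]) - 1:
--             while indexA < len(list[x]) - 1 and list[x][indexA] == 0:  # 找到第一个非0元素
--                 indexA += 1
--             if indexA == len(list[x]) - 1:
--                 break
--             indexB = indexA + 1
--             while indexB <= len(list[x]) - 1 and list[x][indexB] == 0:  # 找到第二个非0元素
--                 indexB += 1
--             if indexB == len(list[x]):
--                 break
--             if list[x][indexA] == list[x][indexB]:  # 如果两个非0元素相等就将indexB合并到indexA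
--                 list[x][indexA] += list[x][indexA]
--                 list[x][indexB] = 0
--                 indexA = indexB + 1  # 合并完成之后从indexB+1号元素开始继续寻找下一趟非零元素
--             else:
--                 indexA = indexB  # 下一趟从indexB开始寻找下一个非零元素
--         indexA = indexB = 0
--     return list
-- ===== SOURCE B (Python) =====
-- def same_element_merge(list):
--     # mutates each row in place (like A) and returns the same outer list
--     for row in list:
--         pos = [i for i, v in enumerate(row) if v != 0]
--         i = 0
--         while i < len(pos):
--             if i + 1 < len(pos) and row[pos[i]] == row[pos[i + 1]]:
--                 row[pos[i]] += row[pos[i]]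
--                 row[pos[i + 1]] = 0
--                 i += 2
--             else:
--                 i += 1
--     return list
-- ===== Notes on version B (the rewrite author's own statement) =====
-- stated objective: simpler
-- what changed: Replaces A's interleaved two-pointer while-loops (which re-scan for nonzero elements inside an outer while) by first building the list of nonzero indices of each row in one pass and then doing a single pairwise merge pass over that index list.
import Mathlib
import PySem

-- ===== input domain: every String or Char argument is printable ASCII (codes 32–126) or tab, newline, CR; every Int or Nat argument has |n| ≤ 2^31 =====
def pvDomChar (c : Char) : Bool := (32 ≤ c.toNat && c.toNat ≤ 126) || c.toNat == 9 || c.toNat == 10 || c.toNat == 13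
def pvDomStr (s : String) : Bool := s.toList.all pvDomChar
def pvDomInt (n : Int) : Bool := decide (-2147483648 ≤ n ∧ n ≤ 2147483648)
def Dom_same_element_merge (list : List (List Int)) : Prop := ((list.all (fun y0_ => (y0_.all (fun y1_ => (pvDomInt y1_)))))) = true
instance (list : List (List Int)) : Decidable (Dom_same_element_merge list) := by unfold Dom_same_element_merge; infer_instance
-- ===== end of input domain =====

-- B replaces A's interleaved two-pointer/while scan by a precomputed table of nonzero
-- indices followed by one pairwise merge pass (objective: simpler).  Both A and B mutate
-- the rows in place in Python and return the same outer list; the theorem is about the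
-- returned value.

-- ===== PORT A =====
-- inner `while indexA < len-1 and row[indexA] == 0` of A
def skipA (row : List Int) (i : Nat) : Nat :=
  if h : i < row.length - 1 ∧ row.getD i 0 = 0 then skipA row (i + 1) else i
termination_by row.length - i
decreasing_by omega

-- inner `while indexB <= len-1 and row[indexB] == 0` of A
def skipB (row : List Int) (i : Nat) : Nat :=
  if h : i ≤ row.length - 1 ∧ row.getD i 0 = 0 then skipB row (i + 1) else i
termination_by row.length + 1 - i
decreasing_by omega

-- `i ≤ skipA row i`, needed for loopA's termination
theorem skipA_ge (row : List Int) (i : Nat) : i ≤ skipA row i := by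
  fun_induction skipA row i with
  | case1 i h ih => omega
  | case2 i h => omega

theorem skipB_ge (row : List Int) (i : Nat) : i ≤ skipB row i := by
  fun_induction skipB row i with
  | case1 i h ih => omega
  | case2 i h => omega

-- outer `while indexA < len(list[x]) - 1` of A (indices are always in range where read,
-- so getD is exact for Python's indexing here)
def loopA (row : List Int) (i : Nat) : List Int :=
  if hw : i < row.length - 1 then
    if skipA row i = row.length - 1 then row
    else if skipB row (skipA row i + 1) = row.length then row
    else if row.getD (skipA row i) 0 = row.getD (skipB row (skipA row i + 1)) 0 then
      loopA ((row.set (skipA row i) (row.getD (skipA row i) 0 + row.getD (skipA row i) 0)).set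
               (skipB row (skipA row i + 1)) 0) (skipB row (skipA row i + 1) + 1)
    else loopA row (skipB row (skipA row i + 1))
  else row
termination_by row.length - i
decreasing_by
  · have h1 := skipA_ge row i
    have h2 := skipB_ge row (skipA row i + 1)
    simp only [List.length_set]
    omega
  · have h1 := skipA_ge row i
    have h2 := skipB_ge row (skipA row i + 1)
    omega

def same_element_merge (list : List (List Int)) : List (List Int) :=
  list.map (fun row => loopA row 0)

-- ===== PORT B =====
-- `pos = [i for i, v in enumerate(row) if v != 0]`
def posList (row : List Int) : List Nat :=
  ((row.zipIdx).filter (fun p => p.1 ≠ 0)).map (fun p => p.2)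

-- the `while i < len(pos)` pass of B; stepping i by 2 / by 1 is the structural recursion
-- on the remaining part of pos
def mergeB (row : List Int) (pos : List Nat) : List Int :=
  match pos with
  | p :: q :: rest =>
      if row.getD p 0 = row.getD q 0 then
        mergeB ((row.set p (row.getD p 0 + row.getD p 0)).set q 0) rest
      else
        mergeB row (q :: rest)
  | _ => row

def same_element_merge_alt (list : List (List Int)) : List (List Int) :=
  list.map (fun row => mergeB row (posList row))

-- ===== PRECONDITION & SPEC =====
def Spec_same_element_merge (list : List (List Int)) (out : List (List Int)) : Prop := out = same_element_merge_alt list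
instance (list : List (List Int)) (out : List (List Int)) : Decidable (Spec_same_element_merge list out) := by unfold Spec_same_element_merge; infer_instance

-- ===== CLAIM (what is proved, stated in full; the proofs are below) =====
def Claim_equal_same_element_merge : Prop := ∀ (list : List (List Int)), Dom_same_element_merge list → Spec_same_element_merge list (same_element_merge list)

-- ===== LEMMAS AND PROOFS =====

-- the list of indices j ≥ i with row[j] ≠ 0, in increasing order
def nzFrom (row : List Int) (i : Nat) : List Nat :=
  if h : i < row.length then
    if row.getD i 0 = 0 then nzFrom row (i + 1) else i :: nzFrom row (i + 1)
  else []
termination_by row.length - i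
decreasing_by all_goals omega

theorem nzFrom_lt (row : List Int) (i : Nat) (hi : i < row.length) :
    nzFrom row i = if row.getD i 0 = 0 then nzFrom row (i + 1) else i :: nzFrom row (i + 1) := by
  rw [nzFrom]; exact dif_pos hi

theorem nzFrom_ge_len (row : List Int) (i : Nat) (h : row.length ≤ i) : nzFrom row i = [] := by
  rw [nzFrom]; exact dif_neg (by omega)

theorem nzFrom_cons (row : List Int) (i p : Nat) (rest : List Nat)
    (h : nzFrom row i = p :: rest) :
    i ≤ p ∧ p < row.length ∧ row.getD p 0 ≠ 0 ∧ rest = nzFrom row (p + 1) := by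
  fun_induction nzFrom row i with
  | case1 i hi hz ih =>
      have := ih h
      exact ⟨by omega, this.2.1, this.2.2.1, this.2.2.2⟩
  | case2 i hi hz ih =>
      simp only [List.cons.injEq] at h
      exact ⟨by omega, h.1 ▸ hi, h.1 ▸ hz, by rw [← h.1]; exact h.2.symm⟩
  | case3 i hi => simp at h

theorem skipA_nil (row : List Int) (i : Nat) (hi : i ≤ row.length - 1)
    (h : nzFrom row i = []) : skipA row i = row.length - 1 := by
  fun_induction skipA row i with
  | case1 i hc ih =>
      apply ih (by have := hc.1; omega)
      rw [nzFrom_lt row i (by have := hc.1; omega), if_pos hc.2] at h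
      exact h
  | case2 i hc =>
      by_cases hl : i < row.length
      · by_cases hz : row.getD i 0 = 0
        · omega
        · rw [nzFrom_lt row i hl, if_neg hz] at h
          simp at h
      · omega

theorem skipA_cons (row : List Int) (i p : Nat) (rest : List Nat)
    (h : nzFrom row i = p :: rest) : skipA row i = min p (row.length - 1) := by
  fun_induction skipA row i with
  | case1 i hc ih =>
      by_cases hl : i < row.length
      · apply ih
        rw [nzFrom_lt row i hl, if_pos hc.2] at h
        exact h
      · rw [nzFrom_ge_len row i (by omega)] at h
        simp at h
  | case2 i hc =>
      obtain ⟨hd1, hd2, hd3, hd4⟩ := nzFrom_cons row i p rest h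
      by_cases hl : i < row.length - 1
      · have hz : ¬ row.getD i 0 = 0 := fun hz => hc ⟨hl, hz⟩
        rw [nzFrom_lt row i (by omega), if_neg hz] at h
        simp only [List.cons.injEq] at h
        omega
      · omega

theorem skipB_nil (row : List Int) (i : Nat) (hi : 0 < row.length ∧ i ≤ row.length)
    (h : nzFrom row i = []) : skipB row i = row.length := by
  fun_induction skipB row i with
  | case1 i hc ih =>
      apply ih (by have := hc.1; omega)
      rw [nzFrom_lt row i (by have := hc.1; omega), if_pos hc.2] at h
      exact h
  | case2 i hc =>
      by_cases hl : i < row.length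
      · by_cases hz : row.getD i 0 = 0
        · exact absurd ⟨by omega, hz⟩ hc
        · rw [nzFrom_lt row i hl, if_neg hz] at h
          simp at h
      · omega

theorem skipB_cons (row : List Int) (i p : Nat) (rest : List Nat)
    (h : nzFrom row i = p :: rest) : skipB row i = p := by
  fun_induction skipB row i with
  | case1 i hc ih =>
      by_cases hl : i < row.length
      · apply ih
        rw [nzFrom_lt row i hl, if_pos hc.2] at h
        exact h
      · rw [nzFrom_ge_len row i (by omega)] at h
        simp at h
  | case2 i hc =>
      obtain ⟨hd1, hd2, hd3, hd4⟩ := nzFrom_cons row i p rest h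
      have hz : ¬ row.getD i 0 = 0 := fun hz => hc ⟨by omega, hz⟩
      rw [nzFrom_lt row i (by omega), if_neg hz] at h
      simp only [List.cons.injEq] at h
      omega

-- rows agreeing (in length and entries) from index i on have the same nonzero indices
theorem nzFrom_congr (row row' : List Int) (i : Nat) (hl : row'.length = row.length)
    (he : ∀ j, i ≤ j → row'.getD j 0 = row.getD j 0) : nzFrom row' i = nzFrom row i := by
  fun_induction nzFrom row i with
  | case1 i hi hz ih =>
      rw [nzFrom_lt row' i (by omega), he i (le_refl i), if_pos hz]
      exact ih (fun j hj => he j (by omega))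
  | case2 i hi hz ih =>
      rw [nzFrom_lt row' i (by omega), he i (le_refl i), if_neg hz]
      rw [ih (fun j hj => he j (by omega))]
  | case3 i hi =>
      rw [nzFrom_ge_len row' i (by omega)]

theorem loopA_eq_mergeB (row : List Int) (i : Nat) :
    loopA row i = mergeB row (nzFrom row i) := by
  fun_induction loopA row i with
  | case1 row i hw ha =>
      -- skipA reached len-1: at most one nonzero index remains, mergeB keeps the row
      rcases h : nzFrom row i with _ | ⟨p, rest⟩
      · rfl
      · obtain ⟨hd1, hd2, hd3, hd4⟩ := nzFrom_cons row i p rest h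
        have hs := skipA_cons row i p rest h
        have hrest : rest = [] := by
          rw [hd4, show p = row.length - 1 by omega]
          exact nzFrom_ge_len row _ (by omega)
        rw [hrest]; rfl
  | case2 row i hw ha hb =>
      -- skipB reached len: exactly one nonzero index remains
      rcases h : nzFrom row i with _ | ⟨p, rest⟩
      · exact absurd (skipA_nil row i (by omega) h) ha
      · obtain ⟨hd1, hd2, hd3, hd4⟩ := nzFrom_cons row i p rest h
        have hs := skipA_cons row i p rest h
        have hp : skipA row i = p := by omega
        rcases h2 : rest with _ | ⟨q, rest'⟩
        · rfl
        · have hq := skipB_cons row (p + 1) q rest' (by rw [← hd4, h2])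
          obtain ⟨he1, he2, he3, he4⟩ := nzFrom_cons row (p + 1) q rest' (by rw [← hd4, h2])
          rw [hp] at hb
          omega
  | case3 row i hw ha hb heq ih =>
      -- merge step: both sides double row[p], zero row[q], continue after q
      rcases h : nzFrom row i with _ | ⟨p, rest⟩
      · exact absurd (skipA_nil row i (by omega) h) ha
      · obtain ⟨hd1, hd2, hd3, hd4⟩ := nzFrom_cons row i p rest h
        have hs := skipA_cons row i p rest h
        have hp : skipA row i = p := by omega
        rcases h2 : rest with _ | ⟨q, rest'⟩
        · exfalso
          have h3 : nzFrom row (p + 1) = [] := by rw [← hd4, h2]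
          rw [hp] at hb
          exact hb (skipB_nil row (p + 1) (by omega) h3)
        · obtain ⟨he1, he2, he3, he4⟩ := nzFrom_cons row (p + 1) q rest' (by rw [← hd4, h2])
          have hq : skipB row (p + 1) = q := skipB_cons row (p + 1) q rest' (by rw [← hd4, h2])
          rw [hp, hq] at heq ih ⊢
          rw [mergeB, if_pos heq]
          rw [ih]
          have hlen : ((row.set p (row.getD p 0 + row.getD p 0)).set q 0).length = row.length := by
            simp
          have hagree : ∀ j, q + 1 ≤ j →
              ((row.set p (row.getD p 0 + row.getD p 0)).set q 0).getD j 0 = row.getD j 0 := by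
            intro j hj
            simp only [List.getD]
            rw [List.getElem?_set_ne (by omega), List.getElem?_set_ne (by omega)]
          rw [nzFrom_congr row _ (q + 1) hlen hagree, ← he4]
  | case4 row i hw ha hb heq ih =>
      -- non-equal step: both sides move on to q
      rcases h : nzFrom row i with _ | ⟨p, rest⟩
      · exact absurd (skipA_nil row i (by omega) h) ha
      · obtain ⟨hd1, hd2, hd3, hd4⟩ := nzFrom_cons row i p rest h
        have hs := skipA_cons row i p rest h
        have hp : skipA row i = p := by omega
        rcases h2 : rest with _ | ⟨q, rest'⟩
        · exfalso
          have h3 : nzFrom row (p + 1) = [] := by rw [← hd4, h2]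
          rw [hp] at hb
          exact hb (skipB_nil row (p + 1) (by omega) h3)
        · obtain ⟨he1, he2, he3, he4⟩ := nzFrom_cons row (p + 1) q rest' (by rw [← hd4, h2])
          have hq : skipB row (p + 1) = q := skipB_cons row (p + 1) q rest' (by rw [← hd4, h2])
          rw [hp, hq] at heq ih ⊢
          rw [mergeB, if_neg heq, ih]
          have hnz : nzFrom row q = q :: rest' := by
            rw [nzFrom_lt row q he2, if_neg he3, ← he4]
          rw [hnz]
  | case5 row i hw =>
      -- i ≥ len-1: at most one nonzero index remains
      rcases h : nzFrom row i with _ | ⟨p, rest⟩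
      · rfl
      · obtain ⟨hd1, hd2, hd3, hd4⟩ := nzFrom_cons row i p rest h
        have hrest : rest = [] := by
          rw [hd4]
          exact nzFrom_ge_len row _ (by omega)
        rw [hrest]; rfl

theorem posList_eq_aux (row : List Int) (i : Nat) :
    nzFrom row i = (((row.drop i).zipIdx i).filter (fun p => p.1 ≠ 0)).map (fun p => p.2) := by
  fun_induction nzFrom row i with
  | case1 i hi hz ih =>
      rw [List.drop_eq_getElem_cons hi, List.zipIdx_cons]
      have hg : row[i] = row.getD i 0 := (List.getD_eq_getElem row 0 hi).symm
      have hri : row[i] = 0 := by rw [hg]; exact hz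
      simp [hri, ih]
  | case2 i hi hz ih =>
      rw [List.drop_eq_getElem_cons hi, List.zipIdx_cons]
      have hg : row[i] = row.getD i 0 := (List.getD_eq_getElem row 0 hi).symm
      have hri : ¬ row[i] = 0 := by rw [hg]; exact hz
      simp [hri, ih]
  | case3 i hi =>
      rw [List.drop_eq_nil_of_le (by omega)]
      rfl

theorem posList_eq (row : List Int) : posList row = nzFrom row 0 := by
  rw [posList_eq_aux row 0]
  simp [posList]

-- ===== VERDICT (by name: the statement is the Claim_ definition above) =====
theorem same_element_merge_spec : Claim_equal_same_element_merge := by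
  intro list _
  unfold Spec_same_element_merge same_element_merge same_element_merge_alt
  apply List.map_congr_left
  intro row _
  rw [loopA_eq_mergeB, posList_eq]
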